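-- pv_equiv track=rewrite | github.com/leah-1ee/coding-test-study | 프로그래머스/1/133502. 햄버거 만들기/햄버거 만들기.py | solution
-- ===== SOURCE A (Python) =====
-- def solution(ingredient):
--     answer = 0
--     stack = []
--
--     for i in ingredient:
--         # 재료 하나씩 쌓기 (push)
--         stack.append(i)
--
--         # 스택 끝 4개가 햄버거 패턴인지 확인
--         if stack[-4:] == [1,2,3,1]:
--             answer += 1
--             del stack[-4:]  # 햄버거 재료 4개 pop
--
--     return answer
-- ===== SOURCE B (Python) =====
-- def solution(ingredient):
--     # Alternative algorithm: repeatedly find the LEFTMOST occurrence of the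
--     # burger pattern [1,2,3,1] and delete it, restarting the scan, until none remains.
--     lst = list(ingredient)
--     answer = 0
--     while True:
--         found = -1
--         for i in range(len(lst) - 3):
--             if lst[i:i+4] == [1, 2, 3, 1]:
--                 found = i
--                 break
--         if found == -1:
--             return answer
--         del lst[found:found+4]
--         answer += 1
-- ===== Notes on version B (the rewrite author's own statement) =====
-- stated objective: alternative
-- what changed: Replaces A's single left-to-right pass with a stack by repeated leftmost-occurrence search-and-delete of the pattern [1,2,3,1] on a working copy of the list.
import Mathlib
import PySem

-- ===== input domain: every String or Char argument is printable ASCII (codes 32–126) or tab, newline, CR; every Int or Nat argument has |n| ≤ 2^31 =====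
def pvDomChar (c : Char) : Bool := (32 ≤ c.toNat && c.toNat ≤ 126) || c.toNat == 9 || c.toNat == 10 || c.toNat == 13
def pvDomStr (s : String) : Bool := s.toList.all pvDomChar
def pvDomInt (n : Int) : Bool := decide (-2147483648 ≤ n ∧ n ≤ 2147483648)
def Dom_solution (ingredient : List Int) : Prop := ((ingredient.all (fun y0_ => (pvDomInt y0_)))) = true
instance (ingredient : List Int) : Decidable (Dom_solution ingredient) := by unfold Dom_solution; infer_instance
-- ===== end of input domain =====

-- B replaces A's single stack pass by repeated leftmost search-and-delete of [1,2,3,1] (alternative algorithm, not faster).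

-- ===== PORT A =====
-- one iteration of A's for-loop: push i, then count and pop 4 if the stack ends with [1,2,3,1]
def stepA (s : Int × List Int) (i : Int) : Int × List Int :=
  let st := s.2 ++ [i]
  if PySem.List.slice st (some (-4)) none = [1, 2, 3, 1] then
    (s.1 + 1, PySem.List.slice st none (some (-4)))
  else
    (s.1, st)

def solution (ingredient : List Int) : Int :=
  (ingredient.foldl stepA (0, [])).1

-- ===== PORT B =====
-- B's inner for-loop: leftmost index i with lst[i:i+4] == [1,2,3,1] (none = found stays -1;
-- the for-loop's slice compare lst[i:i+4] == [1,2,3,1] is the `take 4 = …` test on each tail)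
def findPat : List Int → Option Nat
  | [] => none
  | x :: rest =>
      if (x :: rest).take 4 = [1, 2, 3, 1] then some 0
      else (findPat rest).map (· + 1)

-- needed only for termination of loopB (the deletion removes 4 elements)
theorem findPat_some_bound : ∀ {l : List Int} {i : Nat}, findPat l = some i → i + 4 ≤ l.length := by
  intro l
  induction l with
  | nil => intro i h; simp [findPat] at h
  | cons x rest ih =>
      intro i h
      unfold findPat at h
      split at h
      · rename_i hpat
        have h4 : ((x :: rest).take 4).length = 4 := by rw [hpat]; rfl
        simp only [List.length_take] at h4
        cases h; simp only [List.length_cons] at h4 ⊢; omega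
      · rcases Option.map_eq_some_iff.mp h with ⟨j, hj, hij⟩
        have := ih hj
        subst hij
        simp only [List.length_cons]; omega

-- B's while-loop: delete the leftmost occurrence, count, repeat
def loopB (lst : List Int) (ans : Int) : Int :=
  match h : findPat lst with
  | none => ans
  | some i => loopB (lst.take i ++ lst.drop (i + 4)) (ans + 1)
termination_by lst.length
decreasing_by
  have := findPat_some_bound h
  simp [List.length_take, List.length_drop]
  omega

def solution_alt (ingredient : List Int) : Int :=
  loopB ingredient 0

-- ===== PRECONDITION & SPEC =====
def Spec_solution (ingredient : List Int) (out : Int) : Prop := out = solution_alt ingredient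
instance (ingredient : List Int) (out : Int) : Decidable (Spec_solution ingredient out) := by unfold Spec_solution; infer_instance

-- ===== CLAIM (what is proved, stated in full; the proofs are below) =====
def Claim_equal_solution : Prop := ∀ (ingredient : List Int), Dom_solution ingredient → Spec_solution ingredient (solution ingredient)

-- ===== LEMMAS AND PROOFS =====

-- an occurrence of the burger pattern at position p
def IsPat (l : List Int) (p : Nat) : Prop := (l.drop p).take 4 = [1, 2, 3, 1]

def NoPat (l : List Int) : Prop := ∀ p, ¬ IsPat l p

theorem isPat_zero {l : List Int} : IsPat l 0 ↔ l.take 4 = [1, 2, 3, 1] := by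
  simp [IsPat]

theorem isPat_cons_succ {x : Int} {l : List Int} {q : Nat} :
    IsPat (x :: l) (q + 1) ↔ IsPat l q := by
  simp [IsPat]

theorem isPat_length {l : List Int} {p : Nat} (h : IsPat l p) : p + 4 ≤ l.length := by
  have h4 : ((l.drop p).take 4).length = 4 := by rw [h]; rfl
  simp only [List.length_take, List.length_drop] at h4
  omega

-- IsPat only looks at the first part of an append when the occurrence fits there
theorem isPat_append_iff {l x : List Int} {p : Nat} (hp : p + 4 ≤ l.length) :
    IsPat (l ++ x) p ↔ IsPat l p := by
  unfold IsPat
  rw [List.drop_append_of_le_length (by omega)]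
  rw [List.take_append_of_le_length (by simp [List.length_drop]; omega)]

theorem noPat_take {l : List Int} (h : NoPat l) (n : Nat) : NoPat (l.take n) := by
  intro p hp
  have hlen := isPat_length hp
  simp only [List.length_take] at hlen
  apply h p
  unfold IsPat at hp ⊢
  rw [List.drop_take, List.take_take] at hp
  have hmin : min 4 (n - p) = 4 := by omega
  rwa [hmin] at hp

theorem findPat_eq_none_of_noPat : ∀ {l : List Int}, NoPat l → findPat l = none := by
  intro l
  induction l with
  | nil => intro _; rfl
  | cons x rest ih =>
      intro h
      unfold findPat
      rw [if_neg, ih, Option.map_none]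
      · intro p hp
        exact h (p + 1) (isPat_cons_succ.mpr hp)
      · exact fun hc => h 0 (isPat_zero.mpr hc)

-- findPat returns exactly the LEFTMOST occurrence
theorem findPat_eq_some_iff : ∀ {l : List Int} {p : Nat},
    findPat l = some p ↔ (IsPat l p ∧ ∀ q < p, ¬ IsPat l q) := by
  intro l
  induction l with
  | nil =>
      intro p
      constructor
      · intro h; simp [findPat] at h
      · rintro ⟨h, -⟩; exact absurd (isPat_length h) (by simp)
  | cons x rest ih =>
      intro p
      by_cases hpat : (x :: rest).take 4 = [1, 2, 3, 1]
      · constructor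
        · intro h
          unfold findPat at h
          rw [if_pos hpat] at h
          cases h
          exact ⟨isPat_zero.mpr hpat, by omega⟩
        · rintro ⟨hp, hmin⟩
          cases p with
          | zero => unfold findPat; rw [if_pos hpat]
          | succ k => exact absurd (isPat_zero.mpr hpat) (hmin 0 (by omega))
      · have hstep : findPat (x :: rest) = (findPat rest).map (· + 1) := by
          conv_lhs => rw [findPat.eq_def]
          simp
          intro hx hr
          exact hpat (by simp [hx, hr])
        constructor
        · intro h
          rw [hstep] at h
          rcases Option.map_eq_some_iff.mp h with ⟨j, hj, hij⟩
          rcases ih.mp hj with ⟨hj1, hj2⟩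
          subst hij
          refine ⟨isPat_cons_succ.mpr hj1, ?_⟩
          intro q hq
          cases q with
          | zero => exact fun hc => hpat (isPat_zero.mp hc)
          | succ q' => exact fun hc => hj2 q' (by omega) (isPat_cons_succ.mp hc)
        · rintro ⟨hp, hmin⟩
          cases p with
          | zero => exact absurd (isPat_zero.mp hp) hpat
          | succ k =>
              rw [hstep]
              have : findPat rest = some k :=
                ih.mpr ⟨isPat_cons_succ.mp hp,
                        fun q hq hc => hmin (q + 1) (by omega) (isPat_cons_succ.mpr hc)⟩
              rw [this, Option.map_some]
  -- one-step unfoldings of loopB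
theorem loopB_none {lst : List Int} {ans : Int} (h : findPat lst = none) :
    loopB lst ans = ans := by
  rw [loopB]; split <;> simp_all

theorem loopB_some {lst : List Int} {ans : Int} {i : Nat} (h : findPat lst = some i) :
    loopB lst ans = loopB (lst.take i ++ lst.drop (i + 4)) (ans + 1) := by
  rw [loopB]; split <;> simp_all

-- the loop invariant: A's stack never contains the pattern, and continuing A's pass from
-- stack st on input rest counts exactly what B's repeated leftmost deletion counts on st ++ rest
theorem main_lemma : ∀ (rest st : List Int) (ans : Int), NoPat st →
    (rest.foldl stepA (ans, st)).1 = loopB (st ++ rest) ans := by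
  intro rest
  induction rest with
  | nil =>
      intro st ans h
      simp [loopB_none (findPat_eq_none_of_noPat h)]
  | cons i rest' ih =>
      intro st ans hns
      have hslice1 : PySem.List.slice (st ++ [i]) (some (-4)) none
          = (st ++ [i]).drop ((st ++ [i]).length - 4) :=
        PySem.List.slice_from_neg_ofNat (st ++ [i]) 4 (by omega)
      have hslice2 : PySem.List.slice (st ++ [i]) none (some (-4))
          = (st ++ [i]).take ((st ++ [i]).length - 4) :=
        PySem.List.slice_to_neg_ofNat (st ++ [i]) 4 (by omega)
      simp only [List.foldl_cons, stepA, hslice1, hslice2]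
      by_cases hc : (st ++ [i]).drop ((st ++ [i]).length - 4) = [1, 2, 3, 1]
      · rw [if_pos hc]
        -- the stack has ≥ 4 elements and ends with the pattern
        have hlen4 : 4 ≤ (st ++ [i]).length := by
          by_contra hlt
          have : ((st ++ [i]).drop ((st ++ [i]).length - 4)).length = 4 := by rw [hc]; rfl
          simp only [List.length_drop] at this
          omega
        have hL : 3 ≤ st.length := by simp at hlen4 ⊢; omega
        set a : List Int := (st ++ [i]).take ((st ++ [i]).length - 4) with ha
        have hlena : a.length = st.length - 3 := by
          simp [ha, List.length_take]; omega
        have hsplit : st ++ [i] = a ++ [1, 2, 3, 1] := by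
          rw [ha, ← hc, List.take_append_drop]
        have hna : NoPat a := by
          have : a = st.take (st.length - 3) := by
            rw [ha, List.take_append_of_le_length (by simp)]
            congr 1
            simp
          rw [this]
          exact noPat_take hns _
        -- B finds the leftmost occurrence exactly where A's stack pops
        have hfind : findPat (st ++ i :: rest') = some a.length := by
          have heq : st ++ i :: rest' = (a ++ [1, 2, 3, 1]) ++ rest' := by
            rw [← hsplit]; simp
          rw [heq]
          apply findPat_eq_some_iff.mpr
          constructor
          · unfold IsPat
            rw [List.append_assoc, List.drop_left]
            rfl
          · intro q hq hcq
            have hq4 : q + 4 ≤ st.length := by omega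
            have heq2 : (a ++ [1, 2, 3, 1]) ++ rest' = st ++ ([i] ++ rest') := by
              rw [← hsplit]; simp
            rw [heq2] at hcq
            exact hns q ((isPat_append_iff hq4).mp hcq)
        rw [loopB_some hfind]
        have htake : (st ++ i :: rest').take a.length = a := by
          have heq : st ++ i :: rest' = a ++ ([1, 2, 3, 1] ++ rest') := by
            rw [← List.append_assoc, ← hsplit]; simp
          rw [heq, List.take_left]
        have hdrop : (st ++ i :: rest').drop (a.length + 4) = rest' := by
          have heq : st ++ i :: rest' = (a ++ [1, 2, 3, 1]) ++ rest' := by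
            rw [← hsplit]; simp
          rw [heq]
          have : (a ++ [1, 2, 3, 1]).length = a.length + 4 := by simp
          rw [← this, List.drop_left]
        rw [htake, hdrop]
        exact ih a (ans + 1) hna
      · rw [if_neg hc]
        -- the extended stack still contains no pattern
        have hns' : NoPat (st ++ [i]) := by
          intro q hq
          have hb := isPat_length hq
          simp only [List.length_append, List.length_cons, List.length_nil] at hb
          by_cases hq4 : q + 4 ≤ st.length
          · exact hns q ((isPat_append_iff hq4).mp hq)
          · have hqe : q = (st ++ [i]).length - 4 := by simp; omega
            apply hc
            rw [← hqe]
            have hdl : ((st ++ [i]).drop q).length ≤ 4 := by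
              simp; omega
            rw [← List.take_of_length_le hdl]
            exact hq
        have heq : (st ++ [i]) ++ rest' = st ++ i :: rest' := by simp
        rw [← heq]
        exact ih (st ++ [i]) ans hns'

-- ===== VERDICT (by name: the statement is the Claim_ definition above) =====
theorem solution_spec : Claim_equal_solution := by
  intro ingredient _
  unfold Spec_solution solution solution_alt
  have := main_lemma ingredient [] 0 (by intro p hp; simp [IsPat] at hp)
  simpa using this
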